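-- pv_equiv track=rewrite | github.com/xperthunter/aoc | d19/towels2.py | towel_options
-- ===== SOURCE A (Python) =====
-- def towel_options(towel, patterns):
-- 	towel_opts = dict()
--
-- 	for i,t in enumerate(towel):
-- 		if i not in towel_opts: towel_opts[i] = list()
-- 		for pat in patterns:
-- 			if pat[0] != t: continue
-- 			if i+len(pat) > len(towel): continue
--
-- 			if towel[i:i+len(pat)] == pat: towel_opts[i].append(pat)
--
-- 	return towel_opts
-- ===== SOURCE B (Python) =====
-- def towel_options(towel, patterns):
--     buckets = {}
--     for pat in patterns:
--         buckets.setdefault(pat[0], []).append(pat)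
--     return {i: [p for p in buckets.get(t, []) if towel[i:i+len(p)] == p]
--             for i, t in enumerate(towel)}
-- ===== Notes on version B (the rewrite author's own statement) =====
-- stated objective: faster
-- what changed: B builds a first-character bucket index over the patterns once and emits the result as a dict comprehension, so A's inner scan over all patterns at every position (and A's incremental dict membership-test/insert/append bookkeeping) disappears; only patterns whose first character matches towel[i] are slice-tested at position i.
-- outside the precondition, e.g. on towel_options('', ['']): A returns {}, B raises IndexError
import Mathlib
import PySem

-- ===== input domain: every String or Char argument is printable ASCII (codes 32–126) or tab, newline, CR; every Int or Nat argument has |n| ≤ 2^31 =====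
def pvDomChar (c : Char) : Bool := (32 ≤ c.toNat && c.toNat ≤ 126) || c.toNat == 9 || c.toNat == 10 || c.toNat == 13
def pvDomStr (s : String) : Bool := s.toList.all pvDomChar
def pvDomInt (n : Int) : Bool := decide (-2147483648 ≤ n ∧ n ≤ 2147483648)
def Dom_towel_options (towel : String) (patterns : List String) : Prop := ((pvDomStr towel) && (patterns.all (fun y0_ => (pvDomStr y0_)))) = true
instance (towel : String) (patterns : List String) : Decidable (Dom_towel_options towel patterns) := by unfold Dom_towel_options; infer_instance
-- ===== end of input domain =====

-- B replaces A's inner scan over all patterns (and its dict bookkeeping) by a first-char bucket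
-- index built once, so each position only tests patterns that can start there; objective: faster.


-- ===== PORT A =====
-- inner 'for pat in patterns' loop of A ('pat[0]' is PySem.Str.pyGet?; the none branch is where Python raises, outside Pre_)
def aInner (towel : String) (patterns : List String) (i : Int) (t : Char)
    (d : PySem.Dict Int (List String)) : PySem.Dict Int (List String) :=
  patterns.foldl (fun d pat =>
    match PySem.Str.pyGet? pat 0 with
    | none => d
    | some c =>
      if c ≠ t then d
      else if i + PySem.Str.len pat > PySem.Str.len towel then d
      else if PySem.Str.slice towel (some i) (some (i + PySem.Str.len pat)) = pat
           then d.modify i [] (fun l => l ++ [pat]) else d) d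

def towel_options (towel : String) (patterns : List String) : List (Int × List String) :=
  ((PySem.List.enumerate towel.toList 0).foldl (fun d it =>
    let d := if ¬ d.contains it.1 then d.insert it.1 [] else d
    aInner towel patterns it.1 it.2 d) PySem.Dict.empty).items

-- ===== PORT B =====
-- buckets.setdefault(pat[0], []).append(pat) over all patterns (the none branch is where Python raises)
def bBuckets (patterns : List String) : PySem.Dict Char (List String) :=
  patterns.foldl (fun b pat =>
    match PySem.Str.pyGet? pat 0 with
    | none => b
    | some c => b.modify c [] (fun l => l ++ [pat])) PySem.Dict.empty

def towel_options_alt (towel : String) (patterns : List String) : List (Int × List String) :=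
  let buckets := bBuckets patterns
  (PySem.List.enumerate towel.toList 0).map (fun it =>
    (it.1, (buckets.getD it.2 []).filter (fun p =>
      PySem.Str.slice towel (some it.1) (some (it.1 + PySem.Str.len p)) = p)))

-- ===== PRECONDITION & SPEC =====
-- Pre_ excludes inputs containing an empty pattern: there Python A raises IndexError on pat[0]
-- (except when towel = "" too, where A returns {} but B still evaluates pat[0] and raises).
def Pre_towel_options (towel : String) (patterns : List String) : Prop := "" ∉ patterns
instance (towel : String) (patterns : List String) : Decidable (Pre_towel_options towel patterns) := by unfold Pre_towel_options; infer_instance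
def pvWitness_towel_options : String × List String := ("brwrr", ["b", "r", "br", "wr"])
def Spec_towel_options (towel : String) (patterns : List String) (out : List (Int × List String)) : Prop := out = towel_options_alt towel patterns
instance (towel : String) (patterns : List String) (out : List (Int × List String)) : Decidable (Spec_towel_options towel patterns out) := by unfold Spec_towel_options; infer_instance

-- ===== CLAIM (what is proved, stated in full; the proofs are below) =====
def Claim_equal_towel_options : Prop := ∀ (towel : String) (patterns : List String), Dom_towel_options towel patterns → Pre_towel_options towel patterns → Spec_towel_options towel patterns (towel_options towel patterns)

-- ===== LEMMAS AND PROOFS =====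

-- A's inner-loop acceptance condition at position i with towel[i] = t
def aCond (towel : String) (i : Int) (t : Char) (p : String) : Bool :=
  match PySem.Str.pyGet? p 0 with
  | none => false
  | some c =>
    if c ≠ t then false
    else if i + PySem.Str.len p > PySem.Str.len towel then false
    else decide (PySem.Str.slice towel (some i) (some (i + PySem.Str.len p)) = p)

-- first lookup in 'pre ++ [(i, l)]' when no key of pre is i
theorem get?_append_last : ∀ (pre : List (Int × List String)) (i : Int) (l : List String),
    (∀ q ∈ pre, q.1 ≠ i) →
    (⟨pre ++ [(i, l)]⟩ : PySem.Dict Int (List String)).get? i = some l := by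
  intro pre
  induction pre with
  | nil => intro i l _; simp [PySem.Dict.get?_mk_cons]
  | cons q qs ih =>
    intro i l h
    rw [List.cons_append, PySem.Dict.get?_mk_cons]
    have hq : (q.1 == i) = false := by simp [h q (by simp)]
    simp only [hq, Bool.false_eq_true, if_false]
    exact ih i l (fun r hr => h r (by simp [hr]))

-- the inner loop only edits the freshly appended last entry (i, l)
theorem aInner_items (towel : String) (patterns : List String) (i : Int) (t : Char) :
    ∀ (pre : List (Int × List String)) (l : List String), (∀ q ∈ pre, q.1 ≠ i) →
    aInner towel patterns i t ⟨pre ++ [(i, l)]⟩ =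
      ⟨pre ++ [(i, l ++ patterns.filter (aCond towel i t))]⟩ := by
  intro pre l hfresh
  induction patterns generalizing l with
  | nil => simp [aInner]
  | cons pat ps ih =>
    unfold aInner at ih ⊢
    rw [List.foldl_cons, List.filter_cons]
    have hget : (⟨pre ++ [(i, l)]⟩ : PySem.Dict Int (List String)).get? i = some l :=
      get?_append_last pre i l hfresh
    cases hg : PySem.Str.pyGet? pat 0 with
    | none =>
      have hc : aCond towel i t pat = false := by unfold aCond; rw [hg]
      simp only [hc, Bool.false_eq_true, if_false]
      exact ih l
    | some c =>
      have hstep : aCond towel i t pat =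
          (if c ≠ t then false
           else if i + PySem.Str.len pat > PySem.Str.len towel then false
           else decide (PySem.Str.slice towel (some i) (some (i + PySem.Str.len pat)) = pat)) := by
        unfold aCond; rw [hg]
      by_cases hct : c ≠ t
      · have hc : aCond towel i t pat = false := by rw [hstep, if_pos hct]
        simp only [hc, Bool.false_eq_true, if_false, if_pos hct]
        exact ih l
      · by_cases hover : i + PySem.Str.len pat > PySem.Str.len towel
        · have hc : aCond towel i t pat = false := by rw [hstep, if_neg hct, if_pos hover]
          simp only [hc, Bool.false_eq_true, if_false, if_neg hct, if_pos hover]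
          exact ih l
        · by_cases hsl : PySem.Str.slice towel (some i) (some (i + PySem.Str.len pat)) = pat
          · have hc : aCond towel i t pat = true := by
              rw [hstep, if_neg hct, if_neg hover]; exact decide_eq_true hsl
            have hmod : (⟨pre ++ [(i, l)]⟩ : PySem.Dict Int (List String)).modify i []
                (fun l => l ++ [pat]) = ⟨pre ++ [(i, l ++ [pat])]⟩ := by
              have hcont : (⟨pre ++ [(i, l)]⟩ : PySem.Dict Int (List String)).contains i = true := by
                rw [PySem.Dict.contains_eq_isSome_get?, hget]; rfl
              have hgetD : (⟨pre ++ [(i, l)]⟩ : PySem.Dict Int (List String)).getD i [] = l := by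
                rw [PySem.Dict.getD_eq_get?_getD, hget]; rfl
              apply PySem.Dict.ext
              rw [PySem.Dict.modify, hgetD, PySem.Dict.items_insert_of_contains _ _ hcont]
              show (pre ++ [(i, l)]).map _ = _
              rw [List.map_append]
              congr 1
              · calc (pre.map fun p => if (p.1 == i) = true then (i, l ++ [pat]) else p)
                    = pre.map id := List.map_congr_left (fun q hq => by
                      have : (q.1 == i) = false := by simp [hfresh q hq]
                      simp [this])
                  _ = pre := List.map_id pre
              · simp
            simp only [hc, if_true, if_neg hct, if_neg hover, if_pos hsl, hmod]
            rw [ih (l ++ [pat]) , List.append_assoc]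
            rfl
          · have hc : aCond towel i t pat = false := by
              rw [hstep, if_neg hct, if_neg hover]; exact decide_eq_false hsl
            simp only [hc, Bool.false_eq_true, if_false, if_neg hct, if_neg hover, if_neg hsl]
            exact ih l

-- the outer loop over fresh, pairwise distinct indices appends one entry per position
theorem outer_items (towel : String) (patterns : List String) :
    ∀ (l : List (Int × Char)) (pre : List (Int × List String)),
    (∀ q ∈ pre, ∀ r ∈ l, q.1 ≠ r.1) → (l.map Prod.fst).Nodup →
    l.foldl (fun d it =>
      let d := if ¬ d.contains it.1 then d.insert it.1 [] else d
      aInner towel patterns it.1 it.2 d) ⟨pre⟩ =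
      ⟨pre ++ l.map (fun r => (r.1, patterns.filter (aCond towel r.1 r.2)))⟩ := by
  intro l
  induction l with
  | nil => intro pre _ _; simp
  | cons r rest ih =>
    intro pre hfresh hnd
    rw [List.foldl_cons]
    have hcont : (⟨pre⟩ : PySem.Dict Int (List String)).contains r.1 = false := by
      rw [PySem.Dict.contains_mk]
      refine List.any_eq_false.mpr (fun q hq => ?_)
      simp [hfresh q hq r (by simp)]
    have hins : (⟨pre⟩ : PySem.Dict Int (List String)).insert r.1 [] = ⟨pre ++ [(r.1, [])]⟩ := by
      apply PySem.Dict.ext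
      rw [PySem.Dict.items_insert_of_not_contains _ _ hcont]
    simp only [hcont]
    rw [if_pos (show ¬false = true by simp), hins]
    rw [aInner_items towel patterns r.1 r.2 pre [] (fun q hq => hfresh q hq r (by simp)),
      List.nil_append]
    rw [ih (pre ++ [(r.1, patterns.filter (aCond towel r.1 r.2))])
      (by
        intro q hq r' hr'
        rcases List.mem_append.1 hq with hq | hq
        · exact hfresh q hq r' (List.mem_cons_of_mem _ hr')
        · simp only [List.mem_singleton] at hq
          subst hq
          have : r.1 ∉ rest.map Prod.fst := by
            rw [List.map_cons] at hnd
            exact (List.nodup_cons.1 hnd).1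
          exact fun he => this (he ▸ List.mem_map_of_mem hr')
        )
      (by rw [List.map_cons] at hnd; exact (List.nodup_cons.1 hnd).2)]
    rw [List.map_cons, List.append_assoc]
    rfl

-- the bucket dict groups patterns by first character, preserving order
theorem bFold_getD (c : Char) :
    ∀ (pats : List String) (b : PySem.Dict Char (List String)),
    (pats.foldl (fun b pat =>
      match PySem.Str.pyGet? pat 0 with
      | none => b
      | some c => b.modify c [] (fun l => l ++ [pat])) b).getD c [] =
      b.getD c [] ++ pats.filter (fun p => PySem.Str.pyGet? p 0 == some c) := by
  intro pats
  induction pats with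
  | nil => intro b; simp
  | cons p ps ih =>
    intro b
    rw [List.foldl_cons, List.filter_cons]
    cases hg : PySem.Str.pyGet? p 0 with
    | none => simp only [ih]; simp
    | some c' =>
      simp only [ih, PySem.Dict.getD_modify]
      by_cases hc : c = c'
      · subst hc; simp
      · simp [hc, Ne.symm hc]

theorem bBuckets_getD (patterns : List String) (c : Char) :
    (bBuckets patterns).getD c [] =
      patterns.filter (fun p => PySem.Str.pyGet? p 0 == some c) := by
  unfold bBuckets
  rw [bFold_getD, PySem.Dict.getD_empty, List.nil_append]

-- membership in enumerate
theorem mem_enumerate_elim {α : Type} (r : Int × α) :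
    ∀ (xs : List α) (s : Int), r ∈ PySem.List.enumerate xs s →
    ∃ (k : Nat), ∃ h : k < xs.length, r = (s + k, xs[k]) := by
  intro xs
  induction xs with
  | nil => intro s h; rw [PySem.List.enumerate_nil] at h; cases h
  | cons x xs ih =>
    intro s h
    rw [PySem.List.enumerate_cons] at h
    rcases List.mem_cons.1 h with h | h
    · exact ⟨0, by simp, by simpa using h⟩
    · obtain ⟨k, hk, hr⟩ := ih (s + 1) h
      refine ⟨k + 1, by simpa using hk, ?_⟩
      rw [hr]; congr 1; push_cast; ring

-- pointwise: A's condition = (first char matches the bucket key) && (B's slice test)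
theorem cond_pointwise (towel : String) (k : Nat) (t : Char) (p : String) :
    aCond towel (k : Int) t p =
      ((PySem.Str.pyGet? p 0 == some t) &&
        decide (PySem.Str.slice towel (some (k : Int)) (some ((k : Int) + PySem.Str.len p)) = p)) := by
  unfold aCond
  cases hg : PySem.Str.pyGet? p 0 with
  | none => simp
  | some c =>
    simp only [hg]
    have hlen : 0 < p.toList.length := by
      simp only [pysem] at hg
      exact (List.getElem?_eq_some_iff.mp hg).1
    by_cases hct : c = t
    · subst hct
      have key : PySem.Str.slice towel (some (k : Int)) (some ((k : Int) + PySem.Str.len p)) = p →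
          ((k : Int) + PySem.Str.len p ≤ PySem.Str.len towel) := by
        intro hsp
        have h1 := congrArg String.toList hsp
        rw [PySem.Str.toList_slice, PySem.Chars.slice_eq_listSlice, PySem.Str.len_eq,
          PySem.List.slice_natCast_add] at h1
        have h2 := congrArg List.length h1
        simp only [List.length_take, List.length_drop] at h2
        rw [PySem.Str.len_eq, PySem.Str.len_eq]
        omega
      by_cases hover : (k : Int) + PySem.Str.len p > PySem.Str.len towel
      · rw [if_neg (by simp), if_pos hover]
        have hne : PySem.Str.slice towel (some (k : Int)) (some ((k : Int) + PySem.Str.len p)) ≠ p :=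
          fun h => absurd (key h) (not_le.mpr hover)
        simp only [PySem.Str.len_eq, String.length_toList] at hne ⊢
        simp [hne]
      · rw [if_neg (by simp), if_neg hover]
        simp
    · rw [if_pos hct]
      simp [hct]

-- ===== VERDICT (by name: the statement is the Claim_ definition above) =====
theorem towel_options_spec : Claim_equal_towel_options := by
  intro towel patterns _ _
  unfold Spec_towel_options towel_options towel_options_alt
  have hempty : (PySem.Dict.empty : PySem.Dict Int (List String)) = ⟨[]⟩ := rfl
  rw [hempty, outer_items towel patterns _ [] (by simp) (by
    rw [PySem.List.map_fst_enumerate]; exact PySem.List.nodup_pyRange_one 0 _ )]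
  simp only [List.nil_append]
  apply List.map_congr_left
  intro r hr
  obtain ⟨k, hk, rfl⟩ := mem_enumerate_elim r towel.toList 0 hr
  simp only [bBuckets_getD, List.filter_filter, zero_add]
  refine congrArg (Prod.mk _) ?_
  refine List.filter_congr ?_
  intro p _
  rw [cond_pointwise, Bool.and_comm]
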